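-- pv_equiv track=rewrite | github.com/sshahbazak/TSE24_droneresponse | ClusteringFT/Clustering.py | sort_and_arrange
-- ===== SOURCE A (Python) =====
-- from collections import defaultdict
--
-- def sort_and_arrange(input_dict):
--     sorted_dict = {}
--     for key, values in input_dict.items():
--         type_dict = defaultdict(list)
--         for k, v in values.items():
--             type_prefix = k.split('_')[0]
--             type_dict[type_prefix].append((k, v))
--
--         sorted_values = []
--         for type_prefix, items in type_dict.items():
--             sorted_items = sorted(items, key=lambda x: x[1], reverse=True)
--             sorted_values.extend(sorted_items)
--
--         sorted_dict[key] = dict(sorted_values)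
--
--     return sorted_dict
-- ===== SOURCE B (Python) =====
-- def sort_and_arrange(input_dict):
--     result = {}
--     for key, values in input_dict.items():
--         items = list(values.items())
--         rank = {}
--         for k, _v in items:
--             prefix = k.split('_')[0]
--             if prefix not in rank:
--                 rank[prefix] = len(rank)
--         by_value = sorted(items, key=lambda kv: kv[1], reverse=True)
--         arranged = sorted(by_value, key=lambda kv: rank[kv[0].split('_')[0]])
--         result[key] = dict(arranged)
--     return result
-- ===== Notes on version B (the rewrite author's own statement) =====
-- stated objective: alternative
-- what changed: Replaces A's defaultdict bucket-grouping (group items by key prefix, sort each bucket by value descending, concatenate) by a first-appearance prefix-rank map plus two global stable sorts: by value descending, then by prefix rank ascending.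
import Mathlib
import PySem

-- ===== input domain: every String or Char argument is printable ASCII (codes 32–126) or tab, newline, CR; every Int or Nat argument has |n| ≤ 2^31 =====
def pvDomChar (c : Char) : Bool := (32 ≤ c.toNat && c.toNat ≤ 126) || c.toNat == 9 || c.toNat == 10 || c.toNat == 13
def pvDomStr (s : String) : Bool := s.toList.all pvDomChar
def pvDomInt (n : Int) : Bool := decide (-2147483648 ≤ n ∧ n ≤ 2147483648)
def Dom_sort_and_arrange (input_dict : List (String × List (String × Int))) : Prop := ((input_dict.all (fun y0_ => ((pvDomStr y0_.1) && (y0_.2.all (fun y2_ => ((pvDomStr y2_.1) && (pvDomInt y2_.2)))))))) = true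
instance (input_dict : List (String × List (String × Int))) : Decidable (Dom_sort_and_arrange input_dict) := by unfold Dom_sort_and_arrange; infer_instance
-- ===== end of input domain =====

-- B replaces A's defaultdict bucket-grouping (then sorting each bucket) by a first-appearance
-- prefix-rank map and two global stable sorts (value descending, then prefix rank): alternative
-- decomposition, same cost. Return-value equivalence only (neither version mutates its argument).

-- shared helper: k.split('_')[0]  (split? is exact; sep "_" ≠ "" so it is always `some`)
def pvPrefix (k : String) : String := ((PySem.Str.split? k "_").getD []).headD ""

-- ===== PORT A =====
def sort_and_arrange (input_dict : List (String × List (String × Int))) : List (String × List (String × Int)) :=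
  (input_dict.foldl
    (fun (sorted_dict : PySem.Dict String (List (String × Int))) kv =>
      let type_dict : PySem.Dict String (List (String × Int)) :=
        kv.2.foldl (fun d x => d.modify (pvPrefix x.1) [] (· ++ [x])) PySem.Dict.empty
      let sorted_values : List (String × Int) :=
        type_dict.items.foldl (fun acc pi => acc ++ PySem.List.sorted pi.2 (fun x => x.2) true) []
      sorted_dict.insert kv.1 (PySem.Dict.ofList sorted_values).items)
    PySem.Dict.empty).items

-- ===== PORT B =====
def sort_and_arrange_alt (input_dict : List (String × List (String × Int))) : List (String × List (String × Int)) :=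
  (input_dict.foldl
    (fun (result : PySem.Dict String (List (String × Int))) kv =>
      let items := kv.2
      let rank : PySem.Dict String Int :=
        items.foldl (fun r x => if r.contains (pvPrefix x.1) then r else r.insert (pvPrefix x.1) ((r.size : Int))) PySem.Dict.empty
      let by_value := PySem.List.sorted items (fun x => x.2) true
      let arranged := PySem.List.sorted by_value (fun x => rank.getD (pvPrefix x.1) 0) false
      result.insert kv.1 (PySem.Dict.ofList arranged).items)
    PySem.Dict.empty).items

-- ===== PRECONDITION & SPEC =====
def Spec_sort_and_arrange (input_dict : List (String × List (String × Int))) (out : List (String × List (String × Int))) : Prop := out = sort_and_arrange_alt input_dict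
instance (input_dict : List (String × List (String × Int))) (out : List (String × List (String × Int))) : Decidable (Spec_sort_and_arrange input_dict out) := by unfold Spec_sort_and_arrange; infer_instance

-- ===== CLAIM (what is proved, stated in full; the proofs are below) =====
def Claim_equal_sort_and_arrange : Prop := ∀ (input_dict : List (String × List (String × Int))), Dom_sort_and_arrange input_dict → Spec_sort_and_arrange input_dict (sort_and_arrange input_dict)

-- ===== LEMMAS AND PROOFS =====

def pvD (l : List (String × Int)) : List String := PySem.List.dedup (l.map (fun x => pvPrefix x.1))
def pvGrp (l : List (String × Int)) : PySem.Dict String (List (String × Int)) :=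
  l.foldl (fun d x => d.modify (pvPrefix x.1) [] (· ++ [x])) PySem.Dict.empty

lemma pvD_append (l : List (String × Int)) (x : String × Int) :
    pvD (l ++ [x]) = if pvPrefix x.1 ∈ l.map (fun y => pvPrefix y.1) then pvD l
                     else pvD l ++ [pvPrefix x.1] := by
  simp only [pvD, List.map_append, List.map_cons, List.map_nil, PySem.List.dedup_eq_ofList,
    PySem.Set.ofList_append_singleton, PySem.Set.add_eq_ite, PySem.Set.mem_ofList]

lemma pvD_nodup (l : List (String × Int)) : (pvD l).Nodup := by
  simp only [pvD, PySem.List.dedup_eq_ofList]; exact PySem.Set.nodup_ofList _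

lemma mem_pvD (l : List (String × Int)) (c : String) :
    c ∈ pvD l ↔ c ∈ l.map (fun x => pvPrefix x.1) := by
  simp [pvD, PySem.List.dedup_eq_ofList, PySem.Set.mem_ofList]

lemma pvGrp_items (l : List (String × Int)) :
    (pvGrp l).items = (pvD l).map (fun c => (c, l.filter (fun x => pvPrefix x.1 == c))) := by
  induction l using List.reverseRecOn with
  | nil => rfl
  | append_singleton l x ih =>
    have hkeys : (pvGrp l).keys = pvD l := by
      show (pvGrp l).items.map Prod.fst = pvD l
      rw [ih, List.map_map]
      exact List.map_id'' (fun c => rfl) _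
    have hnd : (pvGrp l).keys.Nodup := by rw [hkeys]; exact pvD_nodup l
    have hstep : pvGrp (l ++ [x])
        = (pvGrp l).insert (pvPrefix x.1) ((pvGrp l).getD (pvPrefix x.1) [] ++ [x]) := by
      simp only [pvGrp, List.foldl_append, List.foldl_cons, List.foldl_nil]; rfl
    by_cases hmem : pvPrefix x.1 ∈ l.map (fun y => pvPrefix y.1)
    · have hmemD : pvPrefix x.1 ∈ pvD l := (mem_pvD l _).mpr hmem
      have hin : (pvPrefix x.1, l.filter (fun y => pvPrefix y.1 == pvPrefix x.1)) ∈ (pvGrp l).items := by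
        rw [ih]; exact List.mem_map_of_mem hmemD
      have hgetD : (pvGrp l).getD (pvPrefix x.1) [] = l.filter (fun y => pvPrefix y.1 == pvPrefix x.1) :=
        PySem.Dict.getD_of_mem_items _ hin hnd []
      have hcont : (pvGrp l).contains (pvPrefix x.1) = true :=
        (PySem.Dict.contains_iff_mem_keys _ _).mpr (hkeys ▸ hmemD)
      rw [hstep, PySem.Dict.items_insert, if_pos hcont, ih, pvD_append, if_pos hmem, List.map_map]
      refine List.map_congr_left (fun c hc => ?_)
      by_cases hcq : c = pvPrefix x.1
      · subst hcq
        simp [hgetD, List.filter_append]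
      · have : (c == pvPrefix x.1) = false := by simp [hcq]
        simp only [Function.comp_apply, this, Bool.false_eq_true, if_false, List.filter_append]
        have : (List.filter (fun y => pvPrefix y.1 == c) [x]) = [] := by
          simp [List.filter_cons, Ne.symm hcq]
        simp [this]
    · have hmemD : pvPrefix x.1 ∉ pvD l := fun h => hmem ((mem_pvD l _).mp h)
      have hcont : (pvGrp l).contains (pvPrefix x.1) = false := by
        rw [← Bool.not_eq_true]
        intro h
        exact hmemD (hkeys ▸ (PySem.Dict.contains_iff_mem_keys _ _).mp h)
      have hgetD : (pvGrp l).getD (pvPrefix x.1) [] = [] :=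
        PySem.Dict.getD_of_not_contains _ _ hcont
      rw [hstep, PySem.Dict.items_insert, if_neg (by simp [hcont]), ih, pvD_append, if_neg hmem,
          List.map_append, hgetD]
      congr 1
      · refine List.map_congr_left (fun c hc => ?_)
        have hne : pvPrefix x.1 ≠ c := fun h => hmemD (h ▸ hc)
        have : (List.filter (fun y => pvPrefix y.1 == c) [x]) = [] := by
          simp [List.filter_cons, hne]
        simp [List.filter_append, this]
      · have : l.filter (fun y => pvPrefix y.1 == pvPrefix x.1) = [] := by
          rw [List.filter_eq_nil_iff]
          intro y hy
          simp only [beq_eq_false_iff_ne, ne_eq, beq_iff_eq]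
          exact fun h => hmem (h ▸ List.mem_map_of_mem hy)
        simp [List.filter_append, this]

def pvRank (l : List (String × Int)) : PySem.Dict String Int :=
  l.foldl (fun r x => if r.contains (pvPrefix x.1) then r else r.insert (pvPrefix x.1) ((r.size : Int))) PySem.Dict.empty

lemma pvRank_spec (l : List (String × Int)) :
    (pvRank l).keys = pvD l ∧ ∀ c ∈ pvD l, (pvRank l).getD c 0 = ((pvD l).idxOf c : Int) := by
  induction l using List.reverseRecOn with
  | nil => exact ⟨rfl, by simp [pvD, PySem.List.dedup_eq_ofList]⟩
  | append_singleton l x ih =>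
    obtain ⟨ihk, ihg⟩ := ih
    have hstep : pvRank (l ++ [x])
        = if (pvRank l).contains (pvPrefix x.1) then pvRank l
          else (pvRank l).insert (pvPrefix x.1) (((pvRank l).size : Int)) := by
      simp only [pvRank, List.foldl_append, List.foldl_cons, List.foldl_nil]
    by_cases hmem : pvPrefix x.1 ∈ l.map (fun y => pvPrefix y.1)
    · have hmemD : pvPrefix x.1 ∈ pvD l := (mem_pvD l _).mpr hmem
      have hcont : (pvRank l).contains (pvPrefix x.1) = true :=
        (PySem.Dict.contains_iff_mem_keys _ _).mpr (ihk ▸ hmemD)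
      rw [hstep, if_pos hcont, pvD_append, if_pos hmem]
      exact ⟨ihk, ihg⟩
    · have hmemD : pvPrefix x.1 ∉ pvD l := fun h => hmem ((mem_pvD l _).mp h)
      have hcont : (pvRank l).contains (pvPrefix x.1) = false := by
        rw [← Bool.not_eq_true]
        intro h
        exact hmemD (ihk ▸ (PySem.Dict.contains_iff_mem_keys _ _).mp h)
      have hsize : (pvRank l).size = (pvD l).length := by
        show (pvRank l).items.length = _
        rw [show (pvRank l).items.length = (pvRank l).keys.length from (List.length_map _).symm, ihk]
      rw [hstep, if_neg (by simp [hcont]), pvD_append, if_neg hmem]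
      constructor
      · rw [PySem.Dict.keys_insert_of_not_contains _ _ hcont, ihk]
      · intro c hc
        rcases List.mem_append.mp hc with hcl | hcq
        · have hne : c ≠ pvPrefix x.1 := fun h => hmemD (h ▸ hcl)
          rw [PySem.Dict.getD_insert, if_neg hne, ihg c hcl, List.idxOf_append, if_pos hcl]
        · have hcq : c = pvPrefix x.1 := by simpa using hcq
          subst hcq
          rw [PySem.Dict.getD_insert, if_pos rfl, List.idxOf_append, if_neg hmemD, hsize]
          simp

lemma insertBy_skip {α : Type} (before : α → α → Bool) (x : α) (b t : List α)
    (h : ∀ y ∈ b, before x y = false) :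
    PySem.List.insertBy before x (b ++ t) = b ++ PySem.List.insertBy before x t := by
  induction b with
  | nil => simp
  | cons y ys ih =>
    simp only [List.cons_append, PySem.List.insertBy, h y (by simp)]
    simp only [Bool.false_eq_true, if_false, List.cons.injEq, true_and]
    exact ih (fun z hz => h z (by simp [hz]))

lemma insertBy_all {α : Type} (before : α → α → Bool) (x : α) (t : List α)
    (h : ∀ y ∈ t, before x y = true) :
    PySem.List.insertBy before x t = x :: t := by
  cases t with
  | nil => rfl
  | cons y ys => simp [PySem.List.insertBy, h y (by simp)]

lemma insertBy_flatMap (rk : String × Int → Int) (rkc : String → Int) :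
    ∀ (K : List String), K.Nodup → K.Pairwise (fun a b => rkc a < rkc b) →
    ∀ (g : String → List (String × Int)) (x : String × Int),
      (∀ c ∈ K, ∀ y ∈ g c, rk y = rkc c) → pvPrefix x.1 ∈ K → rk x = rkc (pvPrefix x.1) →
      PySem.List.insertBy (fun a b => decide (rk a < rk b)) x (K.flatMap g)
        = K.flatMap (fun c => if pvPrefix x.1 == c then g c ++ [x] else g c) := by
  intro K
  induction K with
  | nil => intro _ _ g x _ hx _; simp at hx
  | cons c K' ih =>
    intro hnd hpw g x hg hx hrkx
    rcases List.pairwise_cons.mp hpw with ⟨hlt, hpw'⟩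
    rcases List.nodup_cons.mp hnd with ⟨hcK', hnd'⟩
    simp only [List.flatMap_cons]
    by_cases hc : pvPrefix x.1 = c
    · have hskip : ∀ y ∈ g c, (fun a b => decide (rk a < rk b)) x y = false := by
        intro y hy
        have : rk y = rkc c := hg c (by simp) y hy
        simp [this, hrkx, hc]
      rw [insertBy_skip _ _ _ _ hskip]
      have hall : ∀ y ∈ K'.flatMap g, (fun a b => decide (rk a < rk b)) x y = true := by
        intro y hy
        rcases List.mem_flatMap.mp hy with ⟨c', hc', hyc'⟩
        have h1 : rk y = rkc c' := hg c' (by simp [hc']) y hyc'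
        have h2 : rkc c < rkc c' := hlt c' hc'
        simp [h1, hrkx, hc, h2]
      rw [insertBy_all _ _ _ hall]
      rw [if_pos (by simp [hc])]
      have : K'.flatMap (fun c' => if pvPrefix x.1 == c' then g c' ++ [x] else g c') = K'.flatMap g := by
        refine List.flatMap_congr (fun c' hc' => ?_)
        rw [if_neg (by simp; exact hc ▸ fun h => hcK' (h ▸ hc'))]
      rw [this]
      simp
    · have hx' : pvPrefix x.1 ∈ K' := by
        rcases List.mem_cons.mp hx with h | h
        · exact absurd h hc
        · exact h
      have hskip : ∀ y ∈ g c, (fun a b => decide (rk a < rk b)) x y = false := by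
        intro y hy
        have h1 : rk y = rkc c := hg c (by simp) y hy
        have h2 : rkc c < rkc (pvPrefix x.1) := hlt _ hx'
        simp only [h1, hrkx, decide_eq_false_iff_not, not_lt]
        exact le_of_lt h2
      rw [insertBy_skip _ _ _ _ hskip,
          ih hnd' hpw' g x (fun c' hc' y hy => hg c' (by simp [hc']) y hy) hx' hrkx,
          if_neg (by simp [hc])]

lemma sorted_blocks (rk : String × Int → Int) (rkc : String → Int)
    (K : List String) (hnd : K.Nodup) (hpw : K.Pairwise (fun a b => rkc a < rkc b)) :
    ∀ (s : List (String × Int)), (∀ y ∈ s, pvPrefix y.1 ∈ K) →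
      (∀ y ∈ s, rk y = rkc (pvPrefix y.1)) →
      PySem.List.sorted s rk false = K.flatMap (fun c => s.filter (fun x => pvPrefix x.1 == c)) := by
  intro s
  induction s using List.reverseRecOn with
  | nil => intro _ _; simp [PySem.List.sorted]
  | append_singleton s x ih =>
    intro hmem hrk
    have hmem' : ∀ y ∈ s, pvPrefix y.1 ∈ K := fun y hy => hmem y (by simp [hy])
    have hrk' : ∀ y ∈ s, rk y = rkc (pvPrefix y.1) := fun y hy => hrk y (by simp [hy])
    rw [PySem.List.sorted_eq_foldl_insertBy, List.foldl_append,
        ← PySem.List.sorted_eq_foldl_insertBy]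
    simp only [List.foldl_cons, List.foldl_nil]
    rw [ih hmem' hrk']
    rw [insertBy_flatMap rk rkc K hnd hpw _ x
        (fun c _ y hy => by
          have hys : y ∈ s := List.mem_of_mem_filter hy
          have : pvPrefix y.1 = c := by simpa using List.of_mem_filter hy
          rw [hrk' y hys, this])
        (hmem x (by simp)) (hrk x (by simp))]
    refine List.flatMap_congr (fun c _ => ?_)
    rw [List.filter_append]
    by_cases hxc : pvPrefix x.1 = c
    · rw [if_pos (by simp [hxc])]
      simp [List.filter_cons, hxc]
    · rw [if_neg (by simp [hxc])]
      simp [List.filter_cons, hxc]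

lemma filter_insertBy (q : String × Int → Bool) (x : String × Int) (acc : List (String × Int))
    (h : acc.Pairwise (fun a b => b.2 ≤ a.2)) :
    (PySem.List.insertBy (fun a b => decide (b.2 < a.2)) x acc).filter q
      = if q x then PySem.List.insertBy (fun a b => decide (b.2 < a.2)) x (acc.filter q)
        else acc.filter q := by
  induction acc with
  | nil => cases hq : q x <;> simp [PySem.List.insertBy, hq]
  | cons y ys ih =>
    rcases List.pairwise_cons.mp h with ⟨hy, hys⟩
    by_cases hlt : y.2 < x.2
    · -- x goes in front
      rw [show PySem.List.insertBy (fun a b => decide (b.2 < a.2)) x (y :: ys) = x :: y :: ys by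
        simp [PySem.List.insertBy, hlt]]
      cases hq : q x with
      | false => simp [List.filter_cons, hq]
      | true =>
        have hall : ∀ z ∈ (y :: ys).filter q, (fun a b => decide (b.2 < a.2)) x z = true := by
          intro z hz
          have hz' := List.mem_of_mem_filter hz
          rcases List.mem_cons.mp hz' with rfl | hz''
          · simpa using hlt
          · simp only [decide_eq_true_eq]; exact lt_of_le_of_lt (hy z hz'') hlt
        rw [insertBy_all _ _ _ hall]
        simp [List.filter_cons, hq]
    · -- x goes after y
      rw [show PySem.List.insertBy (fun a b => decide (b.2 < a.2)) x (y :: ys)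
            = y :: PySem.List.insertBy (fun a b => decide (b.2 < a.2)) x ys by
        simp [PySem.List.insertBy, hlt]]
      have ih' := ih hys
      cases hq : q x with
      | false =>
        cases hqy : q y <;> simp [List.filter_cons, hq, hqy, ih', hq]
      | true =>
        cases hqy : q y with
        | false => simp [List.filter_cons, hqy, ih', hq]
        | true =>
          simp only [List.filter_cons, hqy, if_pos, ih', hq, if_true]
          rw [show PySem.List.insertBy (fun a b => decide (b.2 < a.2)) x (y :: ys.filter q)
                = y :: PySem.List.insertBy (fun a b => decide (b.2 < a.2)) x (ys.filter q) by
            simp [PySem.List.insertBy, hlt]]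

lemma filter_sorted_rev (q : String × Int → Bool) (l : List (String × Int)) :
    (PySem.List.sorted l (fun x => x.2) true).filter q
      = PySem.List.sorted (l.filter q) (fun x => x.2) true := by
  induction l using List.reverseRecOn with
  | nil => rfl
  | append_singleton l x ih =>
    rw [PySem.List.sorted_rev_eq_foldl_insertBy, List.foldl_append,
        ← PySem.List.sorted_rev_eq_foldl_insertBy]
    simp only [List.foldl_cons, List.foldl_nil]
    rw [filter_insertBy q x _ (PySem.List.sorted_pairwise_rev l (fun x => x.2)), ih]
    rw [List.filter_append]
    cases hq : q x with
    | false =>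
      simp [List.filter_cons, hq]
    | true =>
      simp only [List.filter_cons, hq, List.filter_nil, if_true]
      rw [PySem.List.sorted_rev_eq_foldl_insertBy (l.filter q ++ [x]), List.foldl_append,
          ← PySem.List.sorted_rev_eq_foldl_insertBy]
      simp


lemma main_inner (l : List (String × Int)) :
    (pvGrp l).items.foldl (fun acc pi => acc ++ PySem.List.sorted pi.2 (fun x => x.2) true) []
      = PySem.List.sorted (PySem.List.sorted l (fun x => x.2) true)
          (fun x => (pvRank l).getD (pvPrefix x.1) 0) false := by
  obtain ⟨hk, hg⟩ := pvRank_spec l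
  have hpw : (pvD l).Pairwise (fun a b => ((pvD l).idxOf a : Int) < ((pvD l).idxOf b : Int)) := by
    rw [List.pairwise_iff_getElem]
    intro i j hi hj hij
    rw [(pvD_nodup l).idxOf_getElem i hi, (pvD_nodup l).idxOf_getElem j hj]
    exact_mod_cast hij
  have hblocks := sorted_blocks (fun x => (pvRank l).getD (pvPrefix x.1) 0)
      (fun c => ((pvD l).idxOf c : Int)) (pvD l) (pvD_nodup l) hpw
      (PySem.List.sorted l (fun x => x.2) true)
      (fun y hy => (mem_pvD l _).mpr
        (List.mem_map_of_mem ((PySem.List.mem_sorted l _ true y).mp hy)))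
      (fun y hy => hg _ ((mem_pvD l _).mpr
        (List.mem_map_of_mem ((PySem.List.mem_sorted l _ true y).mp hy))))
  rw [hblocks, PySem.List.foldl_append_eq_flatMap, pvGrp_items, List.flatMap_map]
  simp only [filter_sorted_rev]
  rfl

-- ===== VERDICT (by name: the statement is the Claim_ definition above) =====
theorem sort_and_arrange_spec : Claim_equal_sort_and_arrange := by
  intro input_dict _
  unfold Spec_sort_and_arrange sort_and_arrange sort_and_arrange_alt
  have h : ∀ (l : List (String × Int)),
      (l.foldl (fun d x => d.modify (pvPrefix x.1) [] (· ++ [x])) PySem.Dict.empty).items.foldl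
          (fun acc pi => acc ++ PySem.List.sorted pi.2 (fun x => x.2) true) []
        = PySem.List.sorted (PySem.List.sorted l (fun x => x.2) true)
            (fun x => (l.foldl (fun r x => if r.contains (pvPrefix x.1) then r
                else r.insert (pvPrefix x.1) ((r.size : Int))) PySem.Dict.empty).getD (pvPrefix x.1) 0) false :=
    fun l => main_inner l
  simp only [h]
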